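-- pv_equiv track=rewrite | github.com/Amol2709/DSA | Sorting/SumTheDifference.py | solve
-- ===== SOURCE A (Python) =====
-- def solve(A):
--     A.sort()
--     n = len(A)
--     _min = 0
--     _max =0
--     for i in range(0,n):
--         temp = A[i]*(2**(n-1-i))
--         _min+=temp
--     for j in range(n-1,-1,-1):
--         temp = A[j]*(2**(j))
--         _max+=temp
--     return int(_max-_min)%int(1e9+7)
-- ===== SOURCE B (Python) =====
-- def solve(A):
--     # One pass over the sorted copy with incremental modular powers of two
--     # (A sorts its argument in place; B does not mutate A — return value equivalence only).
--     MOD = 10**9 + 7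
--     B = sorted(A)
--     n = len(B)
--     s = 0
--     pw = 1
--     for i in range(n):
--         s = (s + (B[i] - B[n - 1 - i]) * pw) % MOD
--         pw = pw * 2 % MOD
--     return s
-- ===== Notes on version B (the rewrite author's own statement) =====
-- stated objective: faster
-- what changed: Replaces A's two index loops with exact huge powers 2**(n-1-i)/2**j and one final mod by a single pass over the sorted copy that folds the pairwise identity sum((A[i]-A[n-1-i])*2^i) with an incrementally doubled power of two, reducing modulo 1e9+7 at every step; A's in-place sort is not reproduced (return value equivalence).
import Mathlib
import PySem

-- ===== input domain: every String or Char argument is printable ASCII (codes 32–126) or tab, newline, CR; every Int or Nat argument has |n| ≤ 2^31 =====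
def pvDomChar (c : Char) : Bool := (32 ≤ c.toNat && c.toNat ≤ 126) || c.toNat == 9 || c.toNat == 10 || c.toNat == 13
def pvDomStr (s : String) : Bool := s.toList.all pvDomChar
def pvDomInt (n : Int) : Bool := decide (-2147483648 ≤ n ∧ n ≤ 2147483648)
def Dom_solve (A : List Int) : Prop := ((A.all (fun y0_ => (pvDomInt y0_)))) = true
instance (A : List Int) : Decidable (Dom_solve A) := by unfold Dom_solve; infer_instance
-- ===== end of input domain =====

-- B is a one-pass modular re-implementation (incremental powers of two mod 1e9+7) of A's
-- exact big-integer double loop; A sorts its argument in place, B does not (return-value equivalence).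

-- ===== PORT A =====
def solve (A : List Int) : Int :=
  let As := PySem.List.sorted A (fun x => x) false
  let n : Int := As.length
  let mn : Int := (PySem.List.pyRange 0 n 1).foldl
      (fun acc i => acc + (PySem.List.pyGetD As i 0) * 2 ^ (n - 1 - i).toNat) 0
  let mx : Int := (PySem.List.pyRange (n - 1) (-1) (-1)).foldl
      (fun acc j => acc + (PySem.List.pyGetD As j 0) * 2 ^ j.toNat) 0
  PySem.Int.mod (mx - mn) 1000000007

-- ===== PORT B =====
def solve_alt (A : List Int) : Int :=
  let MOD : Int := 10 ^ 9 + 7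
  let B := PySem.List.sorted A (fun x => x) false
  let n : Int := B.length
  let r := (PySem.List.pyRange 0 n 1).foldl
      (fun (p : Int × Int) i =>
        (PySem.Int.mod (p.1 + (PySem.List.pyGetD B i 0 - PySem.List.pyGetD B (n - 1 - i) 0) * p.2) MOD,
         PySem.Int.mod (p.2 * 2) MOD))
      (0, 1)
  r.1

-- ===== PRECONDITION & SPEC =====
def Spec_solve (A : List Int) (out : Int) : Prop := out = solve_alt A
instance (A : List Int) (out : Int) : Decidable (Spec_solve A out) := by unfold Spec_solve; infer_instance

-- ===== CLAIM (what is proved, stated in full; the proofs are below) =====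
def Claim_equal_solve : Prop := ∀ (A : List Int), Dom_solve A → Spec_solve A (solve A)

-- ===== LEMMAS AND PROOFS =====

lemma pv_sum_list_finset (n : Nat) (f : Nat → Int) :
    ((List.range n).map f).sum = ∑ i ∈ Finset.range n, f i := by
  induction n with
  | zero => simp
  | succ m ih => rw [List.range_succ]; simp [Finset.sum_range_succ, ih]

lemma pv_mod_add_mul_mod (a b c p : Int) :
    (a % p + b * (c % p)) % p = (a + b * c) % p := by
  have ha : a % p ≡ a [ZMOD p] := Int.emod_emod_of_dvd a dvd_rfl
  have hc : c % p ≡ c [ZMOD p] := Int.emod_emod_of_dvd c dvd_rfl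
  exact ha.add (hc.mul_left b)

lemma pv_mod_mul_two (c p : Int) : (c % p * 2) % p = (c * 2) % p := by
  have hc : c % p ≡ c [ZMOD p] := Int.emod_emod_of_dvd c dvd_rfl
  exact hc.mul_right 2

lemma pv_bloop (g : Nat → Int) (p : Int) (hp : 1 < p) (m : Nat) :
    (List.range m).foldl
      (fun (st : Int × Int) k => ((st.1 + g k * st.2) % p, (st.2 * 2) % p)) (0, 1)
    = ((∑ i ∈ Finset.range m, g i * 2 ^ i) % p, (2 ^ m : Int) % p) := by
  induction m with
  | zero =>
      simp only [List.range_zero, List.foldl_nil, Finset.range_zero, Finset.sum_empty,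
        Int.zero_emod, pow_zero]
      rw [Int.emod_eq_of_lt (by omega) hp]
  | succ m ih =>
      rw [List.range_succ, List.foldl_append, ih]
      simp only [List.foldl_cons, List.foldl_nil]
      refine Prod.ext ?_ ?_
      · show ((∑ i ∈ Finset.range m, g i * 2 ^ i) % p + g m * (2 ^ m % p)) % p = _
        rw [pv_mod_add_mul_mod, Finset.sum_range_succ]
      · show (2 ^ m % p * 2) % p = _
        rw [pv_mod_mul_two, ← pow_succ]

lemma pv_aloop_min (L : List Int) :
    (PySem.List.pyRange 0 (L.length : Int) 1).foldl
      (fun acc i => acc + PySem.List.pyGetD L i 0 * 2 ^ ((L.length : Int) - 1 - i).toNat) 0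
    = ∑ i ∈ Finset.range L.length, L.getD i 0 * 2 ^ (L.length - 1 - i) := by
  rw [PySem.List.pyRange_zero_nat, List.foldl_map, PySem.List.foldl_add, zero_add,
    pv_sum_list_finset]
  refine Finset.sum_congr rfl ?_
  intro k hk
  rw [PySem.List.pyGetD_natCast]
  congr 2
  omega

lemma pv_aloop_max (L : List Int) :
    (PySem.List.pyRange ((L.length : Int) - 1) (-1) (-1)).foldl
      (fun acc j => acc + PySem.List.pyGetD L j 0 * 2 ^ j.toNat) 0
    = ∑ i ∈ Finset.range L.length, L.getD i 0 * 2 ^ i := by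
  rw [PySem.List.pyRange_neg_one_eq_reverse]
  have h1 : (-1 : Int) + 1 = 0 := by ring
  have h2 : (L.length : Int) - 1 + 1 = (L.length : Int) := by ring
  rw [h1, h2, PySem.List.foldl_add, zero_add, List.map_reverse, List.sum_reverse,
    PySem.List.pyRange_zero_nat, List.map_map, pv_sum_list_finset]
  refine Finset.sum_congr rfl ?_
  intro k hk
  simp [PySem.List.pyGetD_natCast]

lemma pv_reflect (L : List Int) :
    ∑ i ∈ Finset.range L.length, L.getD (L.length - 1 - i) 0 * 2 ^ i
    = ∑ i ∈ Finset.range L.length, L.getD i 0 * 2 ^ (L.length - 1 - i) := by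
  rw [← Finset.sum_range_reflect (fun i => L.getD i 0 * 2 ^ (L.length - 1 - i)) L.length]
  refine Finset.sum_congr rfl ?_
  intro k hk
  simp only [Finset.mem_range] at hk
  congr 2
  omega

lemma pv_main (L : List Int) :
    PySem.Int.mod
      ((PySem.List.pyRange ((L.length : Int) - 1) (-1) (-1)).foldl
          (fun acc j => acc + PySem.List.pyGetD L j 0 * 2 ^ j.toNat) 0
        -
        (PySem.List.pyRange 0 (L.length : Int) 1).foldl
          (fun acc i => acc + PySem.List.pyGetD L i 0 * 2 ^ ((L.length : Int) - 1 - i).toNat) 0)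
      1000000007
    =
    ((PySem.List.pyRange 0 (L.length : Int) 1).foldl
        (fun (p : Int × Int) i =>
          (PySem.Int.mod (p.1 + (PySem.List.pyGetD L i 0 - PySem.List.pyGetD L ((L.length : Int) - 1 - i) 0) * p.2) (10 ^ 9 + 7),
           PySem.Int.mod (p.2 * 2) (10 ^ 9 + 7)))
        (0, 1)).1 := by
  have hp : (0:Int) < 10 ^ 9 + 7 := by norm_num
  have hB : (PySem.List.pyRange 0 (L.length : Int) 1).foldl
        (fun (p : Int × Int) i =>
          (PySem.Int.mod (p.1 + (PySem.List.pyGetD L i 0 - PySem.List.pyGetD L ((L.length : Int) - 1 - i) 0) * p.2) (10 ^ 9 + 7),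
           PySem.Int.mod (p.2 * 2) (10 ^ 9 + 7)))
        (0, 1)
      = ((∑ i ∈ Finset.range L.length,
            (L.getD i 0 - L.getD (L.length - 1 - i) 0) * 2 ^ i) % (10 ^ 9 + 7),
         (2 ^ L.length : Int) % (10 ^ 9 + 7)) := by
    rw [PySem.List.pyRange_zero_nat, List.foldl_map]
    rw [PySem.List.foldl_congr_mem (List.range L.length) _
        (fun (st : Int × Int) k =>
          ((st.1 + (L.getD k 0 - L.getD (L.length - 1 - k) 0) * st.2) % (10 ^ 9 + 7),
           (st.2 * 2) % (10 ^ 9 + 7))) (0, 1) ?_]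
    · exact pv_bloop _ _ (by norm_num) _
    · intro acc k hk
      simp only [List.mem_range] at hk
      simp only [PySem.Int.mod_eq_emod_of_pos hp, PySem.List.pyGetD_natCast,
        PySem.List.pyGetD_of_nonneg L (i := (L.length : Int) - 1 - (k : Int)) 0 (by omega)]
      have ht : ((L.length : Int) - 1 - (k : Int)).toNat = L.length - 1 - k := by omega
      rw [ht]
  rw [hB, pv_aloop_max, pv_aloop_min]
  have hs : (∑ i ∈ Finset.range L.length,
      (L.getD i 0 - L.getD (L.length - 1 - i) 0) * 2 ^ i)
      = (∑ i ∈ Finset.range L.length, L.getD i 0 * 2 ^ i)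
        - ∑ i ∈ Finset.range L.length, L.getD i 0 * 2 ^ (L.length - 1 - i) := by
    rw [← pv_reflect, ← Finset.sum_sub_distrib]
    refine Finset.sum_congr rfl ?_
    intro k hk
    ring
  rw [hs, PySem.Int.mod_eq_emod_of_pos (by norm_num)]
  norm_num

-- ===== VERDICT (by name: the statement is the Claim_ definition above) =====
theorem solve_spec : Claim_equal_solve := by
  intro A _
  show solve A = solve_alt A
  exact pv_main (PySem.List.sorted A (fun x => x) false)
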